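-- pv_equiv track=rewrite | github.com/anup00900/InSightAI | simpleem-online/backend/realtime_pipeline.py | _better_name
-- ===== SOURCE A (Python) =====
-- def _better_name(a: str, b: str) -> str:
--     """Pick the higher-quality name variant between two same-person names.
--
--     Prefers: more real words (>= 3 chars), then longer total length.
--     Never picks a name with single/two-char initials over a clean name.
--     """
--     a_words = [w for w in a.split() if len(w) >= 3]
--     b_words = [w for w in b.split() if len(w) >= 3]
--     a_initials = sum(1 for w in a.split() if len(w) <= 2)
--     b_initials = sum(1 for w in b.split() if len(w) <= 2)
--
--     # Penalize names with initials — prefer clean names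
--     if a_initials > 0 and b_initials == 0:
--         return b
--     if b_initials > 0 and a_initials == 0:
--         return a
--
--     # More real words wins
--     if len(a_words) > len(b_words):
--         return a
--     if len(b_words) > len(a_words):
--         return b
--
--     # Same word count — prefer longer total (more complete OCR read)
--     return a if len(a) >= len(b) else b
-- ===== SOURCE B (Python) =====
-- def _better_name(a: str, b: str) -> str:
--     """Pick the higher-quality name variant via one character-level scan per name
--     (run-length word detection, no split) and a loop over the criteria list."""
--     def stats(name):
--         longs = shorts = run = 0
--         for c in name:
--             if c.isspace():
--                 if run > 0:
--                     if run >= 3: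
--                         longs += 1
--                     else:
--                         shorts += 1
--                     run = 0
--             else:
--                 run += 1
--         if run > 0:
--             if run >= 3:
--                 longs += 1
--             else:
--                 shorts += 1
--         return longs, shorts
--
--     la, sa = stats(a)
--     lb, sb = stats(b)
--     criteria = [(1 if sa == 0 else 0, 1 if sb == 0 else 0),
--                 (la, lb),
--                 (len(a), len(b))]
--     for fa, fb in criteria:
--         if fa != fb:
--             return a if fa > fb else b
--     return a
-- ===== Notes on version B (the rewrite author's own statement) =====
-- stated objective: alternative
-- what changed: B never calls split(): it computes each name's word statistics in a single character scan with a run-length accumulator, then decides by iterating over a list of (criterion_a, criterion_b) pairs and returning on the first unequal pair, instead of A's two split passes per name and four-branch comparison cascade.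
import Mathlib
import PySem

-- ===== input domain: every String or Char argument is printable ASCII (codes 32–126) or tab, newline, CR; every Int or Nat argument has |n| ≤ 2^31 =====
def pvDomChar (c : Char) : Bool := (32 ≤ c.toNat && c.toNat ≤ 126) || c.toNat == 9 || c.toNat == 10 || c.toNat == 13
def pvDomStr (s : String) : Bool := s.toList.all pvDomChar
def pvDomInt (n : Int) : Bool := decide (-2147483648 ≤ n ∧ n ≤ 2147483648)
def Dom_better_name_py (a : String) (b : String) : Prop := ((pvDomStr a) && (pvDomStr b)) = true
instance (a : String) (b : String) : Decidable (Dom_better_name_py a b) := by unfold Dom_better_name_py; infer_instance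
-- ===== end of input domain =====

-- B replaces A's split()-based passes and four-branch cascade by one character-level
-- run-length scan per name and a first-unequal-pair loop over a criteria list
-- (objective: alternative).

-- ===== PORT A =====
def better_name_py (a : String) (b : String) : String :=
  let aWords := (PySem.Str.split₀ a).filter (fun w => 3 ≤ PySem.Str.len w)
  let bWords := (PySem.Str.split₀ b).filter (fun w => 3 ≤ PySem.Str.len w)
  let aInitials := ((PySem.Str.split₀ a).map (fun w => if PySem.Str.len w ≤ 2 then (1 : Int) else 0)).sum
  let bInitials := ((PySem.Str.split₀ b).map (fun w => if PySem.Str.len w ≤ 2 then (1 : Int) else 0)).sum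
  if aInitials > 0 ∧ bInitials = 0 then b
  else if bInitials > 0 ∧ aInitials = 0 then a
  else if bWords.length < aWords.length then a
  else if aWords.length < bWords.length then b
  else if PySem.Str.len b ≤ PySem.Str.len a then a else b

-- ===== PORT B =====
-- B's char scan: walk the characters once, keeping the current run of non-space
-- chars; flush the run as a long (>= 3) or short word on whitespace and at the end.
def pvStats : List Char → Int → Int → Int → Int × Int
  | [], longs, shorts, run =>
    if 0 < run then (if 3 ≤ run then (longs + 1, shorts) else (longs, shorts + 1))
    else (longs, shorts)
  | c :: rest, longs, shorts, run =>
    if PySem.Chars.isspace c then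
      if 0 < run then
        (if 3 ≤ run then pvStats rest (longs + 1) shorts 0
         else pvStats rest longs (shorts + 1) 0)
      else pvStats rest longs shorts run
    else pvStats rest longs shorts (run + 1)

-- B's decision loop: return on the first unequal criteria pair; ties fall through to a.
def pvPick (a : String) (b : String) : List (Int × Int) → String
  | [] => a
  | (fa, fb) :: rest => if fa ≠ fb then (if fb < fa then a else b) else pvPick a b rest

def better_name_py_alt (a : String) (b : String) : String :=
  let sA := pvStats a.toList 0 0 0
  let sB := pvStats b.toList 0 0 0
  let criteria : List (Int × Int) :=
    [((if sA.2 = 0 then 1 else 0), (if sB.2 = 0 then 1 else 0)),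
     (sA.1, sB.1),
     (PySem.Str.len a, PySem.Str.len b)]
  pvPick a b criteria

-- ===== PRECONDITION & SPEC =====
def Spec_better_name_py (a : String) (b : String) (out : String) : Prop := out = better_name_py_alt a b
instance (a : String) (b : String) (out : String) : Decidable (Spec_better_name_py a b out) := by unfold Spec_better_name_py; infer_instance

-- ===== CLAIM =====
def Claim_equal_better_name_py : Prop := ∀ (a : String) (b : String), Dom_better_name_py a b → Spec_better_name_py a b (better_name_py a b)

-- ===== LEMMAS AND PROOFS =====

-- split₀.go's accumulator prepends: pull it out.
theorem pv_go_acc (s : List Char) : ∀ (cur : List Char) (acc : List (List Char)),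
    PySem.Chars.split₀.go s cur acc = acc.reverse ++ PySem.Chars.split₀.go s cur [] := by
  induction s with
  | nil =>
    intro cur acc
    simp [PySem.Chars.split₀.go]
    split_ifs <;> simp
  | cons c rest ih =>
    intro cur acc
    simp only [PySem.Chars.split₀.go]
    split_ifs with h1 h2
    · exact ih [] acc
    · rw [ih [] (cur.reverse :: acc), ih [] [cur.reverse]]
      simp
    · exact ih (c :: cur) acc

-- B's scan computes the long/short word counts of the split, offset by the running word.
theorem pv_stats_spec (s : List Char) : ∀ (cur : List Char) (longs shorts : Int),
    pvStats s longs shorts (cur.length : Int) =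
      (longs + ((PySem.Chars.split₀.go s cur []).countP (fun w => 3 ≤ w.length) : Int),
       shorts + ((PySem.Chars.split₀.go s cur []).countP (fun w => w.length ≤ 2) : Int)) := by
  induction s with
  | nil =>
    intro cur longs shorts
    rcases cur with _ | ⟨d, t⟩
    · simp [pvStats, PySem.Chars.split₀.go]
    · have h0 : (0 : Int) < ((d :: t).length : Int) := by exact_mod_cast Nat.succ_pos t.length
      by_cases h3 : (3 : Int) ≤ ((d :: t).length : Int)
      · have h3n : 3 ≤ (d :: t).length := by exact_mod_cast h3
        simp only [pvStats, PySem.Chars.split₀.go, if_pos h0, if_pos h3, List.isEmpty_cons,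
          Bool.false_eq_true, if_false, List.reverse_singleton, List.countP_cons, List.countP_nil,
          decide_eq_true_eq]
        rw [Prod.mk.injEq]
        split_ifs <;> constructor <;>
          (simp only [List.length_reverse, List.length_append, List.length_cons,
            List.length_nil] at * <;> push_cast at * <;> omega)
      · have h3n : (d :: t).length ≤ 2 := by
          have : ¬ 3 ≤ (d :: t).length := fun hc => h3 (by exact_mod_cast hc)
          omega
        simp only [pvStats, PySem.Chars.split₀.go, if_pos h0, if_neg h3, List.isEmpty_cons,
          Bool.false_eq_true, if_false, List.reverse_singleton, List.countP_cons, List.countP_nil,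
          decide_eq_true_eq]
        rw [Prod.mk.injEq]
        split_ifs <;> constructor <;>
          (simp only [List.length_reverse, List.length_append, List.length_cons,
            List.length_nil] at * <;> push_cast at * <;> omega)
  | cons c rest ih =>
    intro cur longs shorts
    by_cases hsp : PySem.Chars.isspace c
    · rcases cur with _ | ⟨d, t⟩
      · have := ih [] longs shorts
        simp only [List.length_nil, Int.natCast_zero] at this
        simpa [pvStats, PySem.Chars.split₀.go, hsp] using this
      · have h0 : (0 : Int) < ((d :: t).length : Int) := by exact_mod_cast Nat.succ_pos t.length
        have hih := ih [] (longs + 1) shorts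
        have hih' := ih [] longs (shorts + 1)
        simp only [List.length_nil, Int.natCast_zero] at hih hih'
        by_cases h3 : (3 : Int) ≤ ((d :: t).length : Int)
        · have h3n : 3 ≤ (d :: t).length := by exact_mod_cast h3
          simp only [pvStats, PySem.Chars.split₀.go, hsp, if_true, if_pos h0, if_pos h3,
            List.isEmpty_cons, Bool.false_eq_true, if_false]
          rw [hih, pv_go_acc rest [] [(d :: t).reverse]]
          simp only [List.reverse_singleton, List.nil_append, List.countP_append,
            List.countP_cons, List.countP_nil, decide_eq_true_eq]
          rw [Prod.mk.injEq]
          split_ifs <;> constructor <;>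
            (simp only [List.length_reverse, List.length_append, List.length_cons,
              List.length_nil] at * <;> push_cast at * <;> omega)
        · have h3n : (d :: t).length ≤ 2 := by
            have : ¬ 3 ≤ (d :: t).length := fun hc => h3 (by exact_mod_cast hc)
            omega
          simp only [pvStats, PySem.Chars.split₀.go, hsp, if_true, if_pos h0, if_neg h3,
            List.isEmpty_cons, Bool.false_eq_true, if_false]
          rw [hih', pv_go_acc rest [] [(d :: t).reverse]]
          simp only [List.reverse_singleton, List.nil_append, List.countP_append,
            List.countP_cons, List.countP_nil, decide_eq_true_eq]
          rw [Prod.mk.injEq]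
          split_ifs <;> constructor <;>
            (simp only [List.length_reverse, List.length_append, List.length_cons,
              List.length_nil] at * <;> push_cast at * <;> omega)
    · have := ih (c :: cur) longs shorts
      simp only [List.length_cons] at this
      push_cast at this
      simpa [pvStats, PySem.Chars.split₀.go, hsp] using this

-- A's ite-sum is a countP.
theorem pv_sum_eq_countP (ws : List String) :
    ((ws.map (fun w => if PySem.Str.len w ≤ 2 then (1 : Int) else 0)).sum
      = (ws.countP (fun w => PySem.Str.len w ≤ 2) : Int)) := by
  induction ws with
  | nil => simp
  | cons w t ih =>
    simp only [List.map_cons, List.sum_cons, List.countP_cons, ih, decide_eq_true_eq]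
    split_ifs <;> push_cast <;> ring

-- The two decision procedures agree for any nonnegative short-word counts.
theorem pv_decide (a b : String) (SA SB LA LB la lb : Int)
    (hSA : 0 ≤ SA) (hSB : 0 ≤ SB) :
    (if SA > 0 ∧ SB = 0 then b
     else if SB > 0 ∧ SA = 0 then a
     else if LB < LA then a
     else if LA < LB then b
     else if lb ≤ la then a else b)
      = pvPick a b [((if SA = 0 then 1 else 0), (if SB = 0 then 1 else 0)), (LA, LB), (la, lb)] := by
  simp only [pvPick, ne_eq]
  split_ifs <;> first | rfl | omega

-- ===== VERDICT =====
set_option maxRecDepth 4096 in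
theorem better_name_py_spec : Claim_equal_better_name_py := by
  intro a b _
  show better_name_py a b = better_name_py_alt a b
  simp only [better_name_py, better_name_py_alt]
  have hsa := pv_stats_spec a.toList [] 0 0
  have hsb := pv_stats_spec b.toList [] 0 0
  simp only [List.length_nil, Int.natCast_zero, zero_add] at hsa hsb
  rw [hsa, hsb]
  -- rewrite A's four quantities as countP over the char-level split
  have hmap : ∀ (s : String),
      ((PySem.Str.split₀ s).filter (fun w => 3 ≤ PySem.Str.len w)).length
        = (PySem.Chars.split₀.go s.toList [] []).countP (fun w => 3 ≤ w.length) := by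
    intro s
    simp only [PySem.Str.split₀, PySem.Chars.split₀, List.filter_map, List.length_map,
      ← List.countP_eq_length_filter]
    apply List.countP_congr
    intro w _
    simp only [Function.comp_apply, PySem.Str.len_eq]
    constructor <;> (intro h; simp only [String.toList_ofList] at * <;> exact_mod_cast h)
  have hinit : ∀ (s : String),
      ((PySem.Str.split₀ s).map (fun w => if PySem.Str.len w ≤ 2 then (1 : Int) else 0)).sum
        = ((PySem.Chars.split₀.go s.toList [] []).countP (fun w => w.length ≤ 2) : Int) := by
    intro s
    rw [pv_sum_eq_countP]
    simp only [PySem.Str.split₀, PySem.Chars.split₀, List.countP_map]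
    congr 1
    apply List.countP_congr
    intro w _
    simp only [Function.comp_apply, PySem.Str.len_eq]
    constructor <;> (intro h; simp only [String.toList_ofList] at * <;> exact_mod_cast h)
  rw [hmap a, hmap b, hinit a, hinit b]
  simp only [← Nat.cast_lt (α := ℤ)]
  exact pv_decide a b _ _ _ _ _ _ (Int.natCast_nonneg _) (Int.natCast_nonneg _)
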